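-- pv_equiv track=rewrite | github.com/NaturelEtChaud/NSI-Premiere | 06 Représentation des textes/TP/interference.py | traitemnt
-- ===== SOURCE A (Python) =====
-- def traitemnt(message_pollue):
--     """
--     Entrée :
--         message_pollue est une chaîne de caractères
--     Pré-condition :
--         message_pollue n'est pas vide
--     Sortie :
--         message est une chaîne de caractères
--     Post-condition :
--         message ne comporte plus de . et tous les caractères entre deux * sont supprimés
--     """
--     message = ''
--     i = 0
--     asterix = False
--     while i<len(message_pollue) :
--         if message_pollue[i] == '*' :
--             asterix = not asterix
--         elif asterix == False and message_pollue[i] != '.' :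
--             message = message + message_pollue[i]
--         i = i + 1
--     return message
-- ===== SOURCE B (Python) =====
-- def traitemnt(message_pollue):
--     parts = message_pollue.split('*')
--     kept = parts[::2]
--     return ''.join(kept).replace('.', '')
-- ===== Notes on version B (the rewrite author's own statement) =====
-- stated objective: faster
-- what changed: Replaces the stateful index loop with a boolean toggle and quadratic character-by-character string concatenation by a pipeline that splits on the asterisk separator, keeps the even-indexed segments, joins them and deletes the dot characters.
import Mathlib
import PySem

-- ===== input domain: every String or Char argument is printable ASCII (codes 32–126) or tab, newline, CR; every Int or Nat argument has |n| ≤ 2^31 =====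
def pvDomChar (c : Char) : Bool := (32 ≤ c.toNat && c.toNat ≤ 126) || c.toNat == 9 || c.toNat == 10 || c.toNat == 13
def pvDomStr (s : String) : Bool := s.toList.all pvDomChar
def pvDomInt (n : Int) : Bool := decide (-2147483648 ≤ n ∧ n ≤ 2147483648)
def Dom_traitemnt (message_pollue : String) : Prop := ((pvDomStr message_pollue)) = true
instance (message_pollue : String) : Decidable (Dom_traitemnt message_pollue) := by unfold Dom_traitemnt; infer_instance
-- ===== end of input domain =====

-- B replaces A's indexed while-loop with a toggle flag and quadratic char-by-char concatenation by a
-- linear split-on-asterisk / keep even-indexed segments / join / delete-dots pipeline (measured faster).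

-- ===== PORT A =====
-- A's while-loop over the characters: state = (asterix flag, message accumulator)
def traitemntLoop : List Char → Bool → List Char → List Char
  | [], _, message => message
  | c :: rest, asterix, message =>
    if c = '*' then traitemntLoop rest (!asterix) message
    else if asterix = false ∧ c ≠ '.' then traitemntLoop rest asterix (message ++ [c])
    else traitemntLoop rest asterix message

def traitemnt (message_pollue : String) : String :=
  String.ofList (traitemntLoop message_pollue.toList false [])

-- ===== PORT B =====
def traitemnt_alt (message_pollue : String) : String :=
  let parts := (PySem.Str.split? message_pollue "*").getD []        -- message_pollue.split('*')
  let kept := (PySem.List.slice? parts none none 2).getD []        -- parts[::2]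
  PySem.Str.replace (PySem.Str.join "" kept) "." ""                -- ''.join(kept).replace('.', '')

-- ===== PRECONDITION & SPEC =====
def Spec_traitemnt (message_pollue : String) (out : String) : Prop := out = traitemnt_alt message_pollue
instance (message_pollue : String) (out : String) : Decidable (Spec_traitemnt message_pollue out) := by unfold Spec_traitemnt; infer_instance

-- ===== CLAIM (what is proved, stated in full; the proofs are below) =====
def Claim_equal_traitemnt : Prop := ∀ (message_pollue : String), Dom_traitemnt message_pollue → Spec_traitemnt message_pollue (traitemnt message_pollue)

-- ===== LEMMAS AND PROOFS =====

-- functional characterisation of A's loop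
def cleanChars : List Char → Bool → List Char
  | [], _ => []
  | c :: rest, asterix =>
    if c = '*' then cleanChars rest (!asterix)
    else if asterix = false ∧ c ≠ '.' then c :: cleanChars rest asterix
    else cleanChars rest asterix

theorem traitemntLoop_eq (l : List Char) (ast : Bool) (msg : List Char) :
    traitemntLoop l ast msg = msg ++ cleanChars l ast := by
  induction l generalizing ast msg with
  | nil => simp [traitemntLoop, cleanChars]
  | cons c rest ih =>
    simp only [traitemntLoop, cleanChars]
    split_ifs <;> simp [ih]

-- structural characterisation of split on the single-character separator '*'
def splitStar : List Char → List (List Char)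
  | [] => [[]]
  | c :: rest =>
    if c = '*' then [] :: splitStar rest
    else
      match splitStar rest with
      | [] => [[c]]
      | p :: ps => (c :: p) :: ps

theorem splitStar_ne_nil (l : List Char) : splitStar l ≠ [] := by
  cases l with
  | nil => simp [splitStar]
  | cons c rest =>
    by_cases h : c = '*'
    · simp [splitStar, h]
    · rcases hs : splitStar rest with _ | ⟨p, ps⟩ <;> simp [splitStar, h, hs]

def consHead (pre : List Char) : List (List Char) → List (List Char)
  | [] => [pre]
  | p :: ps => (pre ++ p) :: ps

theorem splitOn_go_star (l : List Char) (fuel : Nat) (cur : List Char) (acc : List (List Char))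
    (h : l.length < fuel) :
    PySem.Chars.splitOn.go ['*'] fuel l cur acc = acc.reverse ++ consHead cur.reverse (splitStar l) := by
  induction l generalizing fuel cur acc with
  | nil =>
    match fuel, h with
    | fuel + 1, _ => simp [PySem.Chars.splitOn.go, splitStar, consHead]
  | cons c rest ih =>
    match fuel, h with
    | fuel + 1, h =>
      by_cases hc : c = '*'
      · subst hc
        have hpre : (['*'] : List Char).isPrefixOf ('*' :: rest) = true := by
          simp [List.isPrefixOf]
        rw [PySem.Chars.splitOn.go, if_pos hpre]
        simp only [List.length_cons, List.length_nil, List.drop_succ_cons, List.drop_zero]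
        rw [ih fuel [] (cur.reverse :: acc) (by simpa using h)]
        rcases hs : splitStar rest with _ | ⟨p, ps⟩
        · exact absurd hs (splitStar_ne_nil rest)
        · simp [splitStar, hs, consHead]
      · have hpre : (['*'] : List Char).isPrefixOf (c :: rest) = false := by
          simp only [List.isPrefixOf, Bool.and_true, beq_eq_false_iff_ne]
          intro h
          exact hc h.symm
        rw [PySem.Chars.splitOn.go, if_neg (by simp [hpre])]
        rw [ih fuel (c :: cur) acc (by simpa using h)]
        rcases hs : splitStar rest with _ | ⟨p, ps⟩
        · exact absurd hs (splitStar_ne_nil rest)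
        · simp [splitStar, hc, hs, consHead]

theorem splitOn_star (l : List Char) : PySem.Chars.splitOn l ['*'] = splitStar l := by
  rw [PySem.Chars.splitOn, splitOn_go_star l (l.length + 1) [] [] (by omega)]
  rcases hs : splitStar l with _ | ⟨p, ps⟩
  · exact absurd hs (splitStar_ne_nil l)
  · simp [consHead]

-- even/odd-indexed sublists
mutual
def evensL {α : Type} : List α → List α
  | [] => []
  | x :: xs => x :: oddsL xs
def oddsL {α : Type} : List α → List α
  | [] => []
  | _ :: xs => evensL xs
end

theorem evensL_map {α β : Type} (f : α → β) (xs : List α) :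
    evensL (xs.map f) = (evensL xs).map f ∧ oddsL (xs.map f) = (oddsL xs).map f := by
  induction xs with
  | nil => simp [evensL, oddsL]
  | cons x xs ih => simp [evensL, oddsL, ih.1, ih.2]

theorem filterMap_double {α : Type} (n : Nat) : ∀ (xs : List α), xs.length ≤ n →
    List.filterMap (fun k : Nat => xs[2 * k]?) (List.range ((xs.length + 1) / 2)) = evensL xs := by
  induction n using Nat.strong_induction_on with
  | _ n ih =>
    intro xs hlen
    match xs with
    | [] => simp [evensL]
    | [x] => simp [List.range_succ, evensL, oddsL]
    | x :: y :: r =>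
      match n, hlen with
      | n + 2, hlen =>
        have hcnt : ((x :: y :: r).length + 1) / 2 = (r.length + 1) / 2 + 1 := by
          simp only [List.length_cons]; omega
        rw [hcnt, List.range_succ_eq_map, List.filterMap_cons, List.filterMap_map]
        simp only [Nat.mul_zero, List.getElem?_cons_zero]
        have harg : ((fun k : Nat => (x :: y :: r)[2 * k]?) ∘ Nat.succ)
            = (fun k : Nat => r[2 * k]?) := by
          funext k
          simp only [Function.comp, Nat.succ_eq_add_one]
          have h2 : 2 * (k + 1) = (2 * k + 1) + 1 := by omega
          rw [h2, List.getElem?_cons_succ, List.getElem?_cons_succ]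
        have hr : r.length ≤ n + 1 := by simp at hlen; omega
        rw [harg, ih (n + 1) (by omega) r hr]
        simp [evensL, oddsL]

theorem slice_two {α : Type} (xs : List α) :
    PySem.List.slice? xs none none 2 = some (evensL xs) := by
  have hsi : PySem.List.sliceIndices xs.length none none 2 = (0, (xs.length : Int), 2) := by
    simp [PySem.List.sliceIndices]
  rw [PySem.List.slice?, if_neg (by norm_num : ¬ (2 : Int) = 0), hsi]
  have hcount : (if (0 : Int) < (xs.length : Int) then
      (((xs.length : Int) - 0 + 2 - 1) / 2).toNat else 0) = ((xs.length + 1) / 2 : Nat) := by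
    split_ifs with h
    · omega
    · omega
  simp only [show ((0 : Int) < 2) = True from by norm_num, if_true, hcount]
  have harg : (fun k : Nat => xs[((0 : Int) + 2 * (k : Int)).toNat]?)
      = (fun k : Nat => xs[2 * k]?) := by
    funext k
    congr 1
    omega
  rw [harg]
  exact congrArg some (filterMap_double xs.length xs le_rfl)

-- join with the empty separator
theorem join_nil_cons (a : List Char) (ts : List (List Char)) :
    PySem.Chars.join [] (a :: ts) = a ++ PySem.Chars.join [] ts := by
  cases ts with
  | nil => simp [PySem.Chars.join, List.intercalate]
  | cons b ts => simp [PySem.Chars.join, List.intercalate, List.intersperse]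

theorem join_nil_nil : PySem.Chars.join [] ([] : List (List Char)) = [] := by
  simp [PySem.Chars.join, List.intercalate]

-- replace '.' by '' = filter out the dots
theorem replace_go_dot (l : List Char) : ∀ (fuel : Nat) (acc : List Char), l.length ≤ fuel →
    PySem.Chars.replace.go ['.'] [] fuel l acc = acc.reverse ++ l.filter (· ≠ '.') := by
  induction l with
  | nil =>
    intro fuel acc _
    cases fuel <;> simp [PySem.Chars.replace.go]
  | cons c t ih =>
    intro fuel acc hlen
    match fuel, hlen with
    | fuel + 1, hlen =>
      by_cases hc : c = '.'
      · subst hc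
        have hpre : (['.'] : List Char).isPrefixOf ('.' :: t) = true := by
          simp [List.isPrefixOf]
        rw [PySem.Chars.replace.go, if_pos hpre]
        simp only [List.length_cons, List.length_nil, List.drop_succ_cons, List.drop_zero,
          List.reverse_nil, List.nil_append]
        rw [ih fuel acc (by simpa using hlen)]
        simp
      · have hpre : (['.'] : List Char).isPrefixOf (c :: t) = false := by
          simp only [List.isPrefixOf, Bool.and_true, beq_eq_false_iff_ne]
          intro h
          exact hc h.symm
        rw [PySem.Chars.replace.go, if_neg (by simp [hpre])]
        rw [ih fuel (c :: acc) (by simpa using hlen)]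
        simp [hc]

theorem replace_dot (l : List Char) :
    PySem.Chars.replace l ['.'] [] = l.filter (· ≠ '.') := by
  rw [PySem.Chars.replace]
  simp only [List.isEmpty_cons, if_neg]
  rw [replace_go_dot l l.length [] le_rfl]
  simp

-- the crux: A's toggle loop = filter-dots of the join of the even/odd pieces of the split
theorem splitStar_star (rest : List Char) : splitStar ('*' :: rest) = [] :: splitStar rest := by
  simp [splitStar]

theorem splitStar_cons {c : Char} (rest : List Char) (hc : c ≠ '*') {p : List Char}
    {ps : List (List Char)} (hs : splitStar rest = p :: ps) :
    splitStar (c :: rest) = (c :: p) :: ps := by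
  simp [splitStar, hc, hs]

theorem clean_eq_pipeline (l : List Char) :
    cleanChars l false = (PySem.Chars.join [] (evensL (splitStar l))).filter (· ≠ '.')
    ∧ cleanChars l true = (PySem.Chars.join [] (oddsL (splitStar l))).filter (· ≠ '.') := by
  induction l with
  | nil =>
    constructor <;> simp [cleanChars, splitStar, evensL, oddsL, join_nil_cons, join_nil_nil]
  | cons c rest ih =>
    rcases hs : splitStar rest with _ | ⟨p, ps⟩
    · exact absurd hs (splitStar_ne_nil rest)
    · by_cases hc : c = '*'
      · subst hc
        rw [splitStar_star]
        constructor
        · have e1 : cleanChars ('*' :: rest) false = cleanChars rest true := by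
            simp [cleanChars]
          rw [e1, ih.2, show evensL ([] :: splitStar rest) = [] :: oddsL (splitStar rest) from rfl,
            join_nil_cons, List.nil_append]
        · have e2 : cleanChars ('*' :: rest) true = cleanChars rest false := by
            simp [cleanChars]
          rw [e2, ih.1, show oddsL ([] :: splitStar rest) = evensL (splitStar rest) from rfl]
      · rw [splitStar_cons rest hc hs]
        have hR : PySem.Chars.join [] (evensL (splitStar rest))
            = p ++ PySem.Chars.join [] (oddsL ps) := by
          rw [hs, show evensL (p :: ps) = p :: oddsL ps from rfl, join_nil_cons]
        have hL : PySem.Chars.join [] (evensL ((c :: p) :: ps))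
            = c :: (p ++ PySem.Chars.join [] (oddsL ps)) := by
          rw [show evensL ((c :: p) :: ps) = (c :: p) :: oddsL ps from rfl, join_nil_cons]
          rfl
        constructor
        · rw [hL]
          by_cases hd : c = '.'
          · subst hd
            have e : cleanChars ('.' :: rest) false = cleanChars rest false := by
              simp [cleanChars, hc]
            rw [e, ih.1, hR]
            simp
          · have e : cleanChars (c :: rest) false = c :: cleanChars rest false := by
              simp [cleanChars, hc, hd]
            rw [e, ih.1, hR]
            simp [hd]
        · have e : cleanChars (c :: rest) true = cleanChars rest true := by
            simp [cleanChars, hc]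
          rw [e, ih.2, hs, show oddsL ((c :: p) :: ps) = evensL ps from rfl,
            show oddsL (p :: ps) = evensL ps from rfl]

-- ===== VERDICT (by name: the statement is the Claim_ definition above) =====
theorem traitemnt_spec : Claim_equal_traitemnt := by
  intro s _
  show traitemnt s = traitemnt_alt s
  rw [← String.toList_inj]
  simp only [traitemnt, traitemnt_alt, PySem.Str.split?, PySem.Chars.split?,
    PySem.Str.join, PySem.Str.replace]
  rw [show ("*" : String).toList = ['*'] from by decide,
    show ("." : String).toList = ['.'] from by decide]
  rw [if_neg (by simp : ¬ (['*'] : List Char).isEmpty = true), splitOn_star]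
  simp only [Option.map_some, Option.getD_some, slice_two,
    (evensL_map String.ofList (splitStar s.toList)).1]
  rw [traitemntLoop_eq, List.nil_append, (clean_eq_pipeline s.toList).1]
  simp [replace_dot, List.map_map, Function.comp_def]
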